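-- pv_equiv track=rewrite | github.com/JEREMIA1964/EZ-CHAJIM-UNIFIED-WWAQ | lib/yaml_ez_chajim_formatter.py | create_study_schedule
-- ===== SOURCE A (Python) =====
-- from typing import Dict, List, Any, Optional, Union
--
-- def create_study_schedule(total_chunks: int = 1342) -> Dict[int, List[str]]:
--     """Erstellt 49-Tage Omer-Studienplan für alle Chunks"""
--     chunks_per_day = total_chunks // 49
--     remainder = total_chunks % 49
--
--     schedule = {}
--     chunk_index = 1
--
--     for day in range(1, 50):
--         day_chunks = chunks_per_day
--         if day <= remainder:
--             day_chunks += 1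
--
--         schedule[day] = [
--             f"CHUNK_{chunk_index + i:04d}"
--             for i in range(day_chunks)
--         ]
--         chunk_index += day_chunks
--
--     return schedule
-- ===== SOURCE B (Python) =====
-- def create_study_schedule(total_chunks: int = 1342):
--     cpd, r = divmod(total_chunks, 49)
--
--     def start(day):
--         # closed form: number of chunks assigned to days strictly before `day`
--         return (day - 1) * cpd + min(day - 1, r)
--
--     return {day: [f"CHUNK_{k:04d}" for k in range(start(day) + 1, start(day + 1) + 1)]
--             for day in range(1, 50)}
-- ===== Notes on version B (the rewrite author's own statement) =====
-- stated objective: alternative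
-- what changed: B replaces A's sequential pass with a running chunk counter by a closed-form prefix-sum formula start(day) = (day-1)*cpd + min(day-1, r), so every day's chunk-number range is computed independently (a dict comprehension over arithmetic ranges) with no state carried between days.
import Mathlib
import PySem

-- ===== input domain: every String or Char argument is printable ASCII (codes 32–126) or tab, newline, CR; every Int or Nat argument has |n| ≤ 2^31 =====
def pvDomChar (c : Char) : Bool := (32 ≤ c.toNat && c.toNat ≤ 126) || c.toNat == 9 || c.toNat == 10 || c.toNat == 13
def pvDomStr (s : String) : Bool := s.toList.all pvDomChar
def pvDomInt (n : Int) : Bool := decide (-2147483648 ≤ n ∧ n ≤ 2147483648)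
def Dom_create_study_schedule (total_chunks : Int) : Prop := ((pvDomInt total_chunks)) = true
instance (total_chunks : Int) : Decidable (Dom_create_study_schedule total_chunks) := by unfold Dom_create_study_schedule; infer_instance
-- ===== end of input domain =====

-- B computes each day's chunk-number range independently from the closed-form prefix-sum
-- start(day) = (day-1)*cpd + min(day-1, r), instead of A's sequential pass carrying a
-- running chunk counter between days (alternative decomposition, same cost; return value only).

-- ===== PORT A =====
-- f"CHUNK_{n:04d}" (n is always positive when reached): sign-aware zero pad = str(n).zfill(4)
def pvFmt (n : Int) : String := "CHUNK_" ++ PySem.Str.zfill (PySem.Int.toStr n) 4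

-- one iteration of A's `for day in range(1, 50)` loop; state = (schedule, chunk_index)
def pvStepA (cpd r : Int) (st : PySem.Dict Int (List String) × Int) (day : Int) :
    PySem.Dict Int (List String) × Int :=
  let day_chunks := cpd + (if day ≤ r then 1 else 0)
  (st.1.insert day ((PySem.List.pyRange 0 day_chunks 1).map (fun i => pvFmt (st.2 + i))),
   st.2 + day_chunks)

def create_study_schedule (total_chunks : Int) : List (Int × List String) :=
  let cpd := PySem.Int.floordiv total_chunks 49
  let r := PySem.Int.mod total_chunks 49
  (((PySem.List.pyRange 1 50 1).foldl (pvStepA cpd r) (PySem.Dict.empty, 1)).1).items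

-- ===== PORT B =====
-- closed form: chunks assigned to days strictly before `day`
def pvStart (cpd r day : Int) : Int := (day - 1) * cpd + min (day - 1) r

-- the dict comprehension `{day: [...] for day in range(1, 50)}`: fold of insert, no carried state
def pvStepB (cpd r : Int) (d : PySem.Dict Int (List String)) (day : Int) :
    PySem.Dict Int (List String) :=
  d.insert day
    ((PySem.List.pyRange (pvStart cpd r day + 1) (pvStart cpd r (day + 1) + 1) 1).map pvFmt)

def create_study_schedule_alt (total_chunks : Int) : List (Int × List String) :=
  let cpd := PySem.Int.floordiv total_chunks 49
  let r := PySem.Int.mod total_chunks 49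
  ((PySem.List.pyRange 1 50 1).foldl (pvStepB cpd r) PySem.Dict.empty).items

-- ===== PRECONDITION & SPEC =====
def Spec_create_study_schedule (total_chunks : Int) (out : List (Int × List String)) : Prop := out = create_study_schedule_alt total_chunks
instance (total_chunks : Int) (out : List (Int × List String)) : Decidable (Spec_create_study_schedule total_chunks out) := by unfold Spec_create_study_schedule; infer_instance

-- ===== CLAIM (what is proved, stated in full; the proofs are below) =====
def Claim_equal_create_study_schedule : Prop := ∀ (total_chunks : Int), Dom_create_study_schedule total_chunks → Spec_create_study_schedule total_chunks (create_study_schedule total_chunks)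

-- ===== LEMMAS AND PROOFS =====

-- a range of consecutive chunk numbers, formatted, equals A's format-by-offset comprehension
lemma pvRange_shift (a s : Int) :
    (PySem.List.pyRange 0 s 1).map (fun i => pvFmt (a + i))
      = (PySem.List.pyRange a (a + s) 1).map pvFmt := by
  apply List.ext_getElem
  · simp [PySem.List.length_pyRange_one]
  · intro k hk1 hk2
    simp [PySem.List.getElem_pyRange_one]

-- B's closed-form start advances by exactly A's day_chunks
lemma pvStart_succ (cpd r day : Int) (h1 : 1 ≤ day) (hr : 0 ≤ r) :
    pvStart cpd r (day + 1) = pvStart cpd r day + (cpd + (if day ≤ r then 1 else 0)) := by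
  unfold pvStart
  split <;> [skip; skip] <;> rw [min_def, min_def] <;> split_ifs <;> ring_nf <;> omega

-- the two folds produce the same dict when A's chunk_index equals start(day)+1
lemma pvFold_eq (cpd r : Int) (hr : 0 ≤ r) :
    ∀ (n : Nat) (day : Int) (d : PySem.Dict Int (List String)), 1 ≤ day →
      ((PySem.List.pyRange day (day + n) 1).foldl (pvStepA cpd r)
          (d, pvStart cpd r day + 1)).1
        = (PySem.List.pyRange day (day + n) 1).foldl (pvStepB cpd r) d := by
  intro n
  induction n with
  | zero =>
    intro day d _
    rw [PySem.List.pyRange_one_eq_nil (by omega)]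
    rfl
  | succ n ih =>
    intro day d hday
    push_cast
    rw [PySem.List.pyRange_one_cons (by omega : day < day + ((n : Int) + 1))]
    simp only [List.foldl_cons, pvStepA, pvStepB]
    have hs := pvStart_succ cpd r day hday hr
    rw [pvRange_shift (pvStart cpd r day + 1) (cpd + (if day ≤ r then 1 else 0))]
    have harr : day + ((n : Int) + 1) = (day + 1) + (n : Int) := by ring
    rw [harr]
    have key : pvStart cpd r day + 1 + (cpd + (if day ≤ r then 1 else 0))
        = pvStart cpd r (day + 1) + 1 := by omega
    rw [key]
    exact ih (day + 1) _ (by omega)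

-- ===== VERDICT (by name: the statement is the Claim_ definition above) =====
theorem create_study_schedule_spec : Claim_equal_create_study_schedule := by
  intro total _
  unfold Spec_create_study_schedule create_study_schedule create_study_schedule_alt
  simp only []
  set cpd := PySem.Int.floordiv total 49 with hcpd
  set r := PySem.Int.mod total 49 with hr
  have hr0 : 0 ≤ r := PySem.Int.mod_nonneg total (by norm_num)
  have h1 : pvStart cpd r 1 + 1 = 1 := by unfold pvStart; rw [min_def]; split <;> omega
  have := pvFold_eq cpd r hr0 49 1 PySem.Dict.empty (by norm_num)
  norm_num at this
  rw [h1] at this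
  rw [this]
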